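-- pv_equiv track=rewrite | github.com/neizod/problems | acm/uva/11413-fill-the-containers.py | n_container
-- ===== SOURCE A (Python) =====
-- def n_container(target, ls):
--     ls = ls[:]
--     val = 0
--     use = 0
--     while ls:
--         if val == 0:
--             use += 1
--         get = ls.pop()
--         val += get
--         if val > target:
--             ls.append(get)
--         if val >= target:
--             val = 0
--     return use
-- ===== SOURCE B (Python) =====
-- def n_container(target, ls):
--     val = 0
--     use = 0
--     for get in reversed(ls):
--         if val == 0:
--             use += 1
--         if val + get > target:
--             use += 1
--             val = get
--         else:
--             val += get
--         if val >= target: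
--             val = 0
--     return use
-- ===== Notes on version B (the rewrite author's own statement) =====
-- stated objective: simpler
-- what changed: B replaces A's mutable worklist with pop/push-back and re-processing of overflowing items by a single pass over reversed(ls) that opens the new container inline, so no copy of the list and no re-popped elements.
-- outside the precondition, e.g. on n_container(5, [10, -7]): A returns 1, B returns 1
import Mathlib
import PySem

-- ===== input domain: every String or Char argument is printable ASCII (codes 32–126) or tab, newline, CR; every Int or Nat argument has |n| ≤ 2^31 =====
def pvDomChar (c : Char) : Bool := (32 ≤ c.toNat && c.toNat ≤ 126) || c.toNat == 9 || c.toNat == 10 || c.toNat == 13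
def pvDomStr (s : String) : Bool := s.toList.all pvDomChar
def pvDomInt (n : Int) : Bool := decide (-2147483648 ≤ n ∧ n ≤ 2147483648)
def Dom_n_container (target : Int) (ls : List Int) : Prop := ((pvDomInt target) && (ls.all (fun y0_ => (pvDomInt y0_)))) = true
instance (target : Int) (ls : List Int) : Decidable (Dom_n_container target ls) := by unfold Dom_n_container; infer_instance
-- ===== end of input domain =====

-- B replaces A's pop/push-back worklist by one pass over reversed(ls) with an inline
-- new-container step; simpler, return value proved equal on Pre_ (items ≤ target).


-- ===== PORT A =====
-- A's while loop, fuel-bounded: under Pre_ (every item ≤ target) each element is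
-- popped at most twice, so fuel 2*len+1 never runs out there; outside Pre_ the
-- Python loop can diverge and nothing is claimed.
def nContainerLoopA (target : Int) : Nat → List Int → Int → Int → Int
  | 0, _, _, use => use
  | fuel + 1, ls, val, use =>
    match ls.getLast? with
    | none => use
    | some get =>
      let use' := if val = 0 then use + 1 else use
      let val1 := val + get
      let ls' := if target < val1 then ls.dropLast ++ [get] else ls.dropLast
      let val2 := if target ≤ val1 then 0 else val1
      nContainerLoopA target fuel ls' val2 use'

def n_container (target : Int) (ls : List Int) : Int :=
  nContainerLoopA target (2 * ls.length + 1) ls 0 0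

-- ===== PORT B =====
def nContainerStepB (target : Int) (s : Int × Int) (get : Int) : Int × Int :=
  let use := if s.1 = 0 then s.2 + 1 else s.2
  let p := if target < s.1 + get then (get, use + 1) else (s.1 + get, use)
  (if target ≤ p.1 then 0 else p.1, p.2)

def n_container_alt (target : Int) (ls : List Int) : Int :=
  (ls.reverse.foldl (nContainerStepB target) (0, 0)).2

-- ===== PRECONDITION & SPEC =====
-- Pre_ excludes inputs holding an item greater than target: there A's push-back loop
-- diverges whenever such an item is popped at val == 0; A still happens to return on
-- a few such inputs when earlier negative items absorb the excess, but its
-- termination there is not a closed-form condition of the input.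
def Pre_n_container (target : Int) (ls : List Int) : Prop := ∀ x ∈ ls, x ≤ target
instance (target : Int) (ls : List Int) : Decidable (Pre_n_container target ls) := by
  unfold Pre_n_container; infer_instance
def pvWitness_n_container : Int × List Int := (5, [1, 2, 3])

def Spec_n_container (target : Int) (ls : List Int) (out : Int) : Prop := out = n_container_alt target ls
instance (target : Int) (ls : List Int) (out : Int) : Decidable (Spec_n_container target ls out) := by unfold Spec_n_container; infer_instance

-- ===== CLAIM (what is proved, stated in full; the proofs are below) =====
def Claim_equal_n_container : Prop := ∀ (target : Int) (ls : List Int), Dom_n_container target ls → Pre_n_container target ls → Spec_n_container target ls (n_container target ls)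

-- ===== LEMMAS AND PROOFS =====

-- Main loop correspondence: A's worklist loop on r.reverse equals B's fold over r,
-- provided every element of r is ≤ target and the fuel covers 2·|r| steps.
theorem nContainerLoop_eq_fold (target : Int) :
    ∀ (r : List Int), (∀ x ∈ r, x ≤ target) → ∀ (fuel : Nat), 2 * r.length ≤ fuel →
      ∀ (val use : Int),
        nContainerLoopA target (fuel + 1) r.reverse val use
          = (r.foldl (nContainerStepB target) (val, use)).2 := by
  intro r
  induction r with
  | nil =>
    intro _ fuel _ val use
    simp [nContainerLoopA]
  | cons g r' ih =>
    intro hle fuel hfuel val use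
    have hg : g ≤ target := hle g (by simp)
    have hle' : ∀ x ∈ r', x ≤ target := fun x hx => hle x (by simp [hx])
    have hlen : 2 * r'.length + 2 ≤ fuel := by
      simp [List.length_cons] at hfuel; omega
    -- unfold one step of A's loop on r'.reverse ++ [g]
    have hrev : (g :: r').reverse = r'.reverse ++ [g] := by simp
    rw [hrev]
    show nContainerLoopA target (fuel + 1) (r'.reverse ++ [g]) val use = _
    rw [nContainerLoopA]
    simp only [List.getLast?_concat, List.dropLast_concat]
    by_cases hover : target < val + g
    · -- overflow: A pushes g back, resets val, re-pops g next step
      have hge : target ≤ val + g := le_of_lt hover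
      simp only [hover, hge, if_pos]
      obtain ⟨fuel2, rfl⟩ : ∃ f2, fuel = f2 + 2 := ⟨fuel - 2, by omega⟩
      show nContainerLoopA target (fuel2 + 2) (r'.reverse ++ [g]) 0 _ = _
      rw [nContainerLoopA]
      simp only [List.getLast?_concat, List.dropLast_concat, zero_add]
      simp only [if_true, if_neg (not_lt.mpr hg)]
      rw [ih hle' fuel2 (by omega)]
      simp [nContainerStepB, hover]
    · have hnover : ¬ target < val + g := hover
      simp only [hnover, if_false]
      obtain ⟨fuel1, rfl⟩ : ∃ f1, fuel = f1 + 1 := ⟨fuel - 1, by omega⟩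
      rw [ih hle' fuel1 (by omega)]
      simp [nContainerStepB, hnover]

-- ===== VERDICT (by name: the statement is the Claim_ definition above) =====
theorem n_container_spec : Claim_equal_n_container := by
  intro target ls _ hpre
  show n_container target ls = n_container_alt target ls
  unfold n_container n_container_alt
  have h := nContainerLoop_eq_fold target ls.reverse
    (by intro x hx; exact hpre x (List.mem_reverse.mp hx))
    (2 * ls.length) (by simp) 0 0
  simpa using h
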